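-- pv_equiv track=rewrite | github.com/Muz-guzgu/bkaczmarczyk | matura/matura 2023 czerwiec/zad 2.py | najmnniejszy_sufiks
-- ===== SOURCE A (Python) =====
-- def czy_mniejszy(n, s ,k1, k2):
--     i = k1 - 1
--     j = k2 - 1
--     n = n - 1
--     while i <= n and j <=n:
--         if s[i] == s[j]:
--             i = i + 1
--             j = j + 1
--         else:
--             if s[i] < s[j]:
--                 return "TAK"
--             else:
--                 return "NIE"
--     if j <= n:
--         return "TAK"
--     else:
--         return "NIE"
--
-- def najmnniejszy_sufiks(slowo):
--     len_slowo = len(slowo)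
--     T = [i for i in range(1, len_slowo + 1)]
--     lista_indeksow = [i for i in range(1, len_slowo + 1)]
--     for i in lista_indeksow:
--         licznik = 0
--         for j in lista_indeksow:
--             if i != j and czy_mniejszy(len_slowo, slowo, i, j) == "NIE":
--                 licznik += 1
--         if licznik == 0:
--             return slowo[i-1:]
-- ===== SOURCE B (Python) =====
-- def najmnniejszy_sufiks(slowo):
--     # the answer is simply the lexicographically smallest suffix
--     return min(slowo[i:] for i in range(len(slowo)))
-- ===== Notes on version B (the rewrite author's own statement) =====
-- stated objective: simpler
-- what changed: A tests every suffix against every other suffix with a hand-written char-by-char comparison loop (three nested loops); B is a one-liner taking min() over the list of suffixes, relying on Python's built-in lexicographic string comparison.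
-- outside the precondition, e.g. on najmnniejszy_sufiks(''): A returns None, B raises ValueError
import Mathlib
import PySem

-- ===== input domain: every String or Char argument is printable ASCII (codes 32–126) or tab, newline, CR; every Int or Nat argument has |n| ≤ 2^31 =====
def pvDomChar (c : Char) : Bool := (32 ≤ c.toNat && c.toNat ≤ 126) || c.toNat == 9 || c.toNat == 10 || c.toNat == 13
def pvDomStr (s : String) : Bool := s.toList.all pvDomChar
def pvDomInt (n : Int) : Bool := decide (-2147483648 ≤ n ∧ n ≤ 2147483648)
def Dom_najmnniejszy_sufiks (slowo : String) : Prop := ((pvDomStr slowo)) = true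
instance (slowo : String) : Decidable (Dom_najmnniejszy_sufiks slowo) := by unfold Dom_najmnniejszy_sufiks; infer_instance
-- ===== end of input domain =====

-- B replaces A's three nested comparison loops by a single min() over the suffixes (simpler; return-value equivalence only).

-- ===== PORT A =====
-- the while loop of czy_mniejszy; s[i]/s[j] are always in range at A's call sites
-- (1 ≤ k1,k2 ≤ len), so the pyGetD default ' ' is never the value read inside Pre_.
def czyLoop (s : List Char) (n i j : Int) : String :=
  if i ≤ n ∧ j ≤ n then
    if PySem.List.pyGetD s i ' ' = PySem.List.pyGetD s j ' ' then
      czyLoop s n (i + 1) (j + 1)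
    else if PySem.List.pyGetD s i ' ' < PySem.List.pyGetD s j ' ' then "TAK" else "NIE"
  else
    if j ≤ n then "TAK" else "NIE"
termination_by (n + 1 - i).toNat
decreasing_by omega

def czy_mniejszy (n : Int) (s : String) (k1 k2 : Int) : String :=
  czyLoop s.toList (n - 1) (k1 - 1) (k2 - 1)

-- the outer 'for i in lista_indeksow' loop; [] = the Python falls through and returns None
-- (only reachable for slowo = "", excluded by Pre_)
def aLoop (slowo : String) (len : Int) (lista : List Int) : List Int → String
  | [] => ""
  | i :: rest =>
    let licznik := lista.foldl
      (fun acc j => if i ≠ j ∧ czy_mniejszy len slowo i j = "NIE" then acc + 1 else acc) 0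
    if licznik = 0 then PySem.Str.slice slowo (some (i - 1)) none
    else aLoop slowo len lista rest

def najmnniejszy_sufiks (slowo : String) : String :=
  let len := PySem.Str.len slowo
  let _T := PySem.List.pyRange 1 (len + 1) 1   -- dead variable, present in the Python too
  let lista := PySem.List.pyRange 1 (len + 1) 1
  aLoop slowo len lista lista

-- ===== PORT B =====
-- min() on the empty list raises ValueError in Python (slowo = "", excluded by Pre_); getD "" there.
def najmnniejszy_sufiks_alt (slowo : String) : String :=
  (PySem.List.min?
      ((PySem.List.pyRange 0 (PySem.Str.len slowo) 1).map
        (fun i => PySem.Str.slice slowo (some i) none))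
      (fun x => x)).getD ""

-- ===== PRECONDITION & SPEC =====
-- On slowo = "", A falls through its loop and returns None (not a str) and B's min() raises ValueError.
def Pre_najmnniejszy_sufiks (slowo : String) : Prop := slowo ≠ ""
instance (slowo : String) : Decidable (Pre_najmnniejszy_sufiks slowo) := by unfold Pre_najmnniejszy_sufiks; infer_instance
def pvWitness_najmnniejszy_sufiks : String := "ba"

def Spec_najmnniejszy_sufiks (slowo : String) (out : String) : Prop := out = najmnniejszy_sufiks_alt slowo
instance (slowo : String) (out : String) : Decidable (Spec_najmnniejszy_sufiks slowo out) := by unfold Spec_najmnniejszy_sufiks; infer_instance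

-- ===== CLAIM (what is proved, stated in full; the proofs are below) =====
def Claim_equal_najmnniejszy_sufiks : Prop := ∀ (slowo : String), Dom_najmnniejszy_sufiks slowo → Pre_najmnniejszy_sufiks slowo → Spec_najmnniejszy_sufiks slowo (najmnniejszy_sufiks slowo)

-- ===== LEMMAS AND PROOFS =====

-- the suffix string slowo[k:] reads as a drop on the char list
lemma slice_toList (s : String) (k : Nat) :
    (PySem.Str.slice s (some (k : Int)) none).toList = s.toList.drop k := by
  simp [PySem.Str.slice, PySem.List.slice_from_natCast]

-- czyLoop decides strict lexicographic order of the two suffixes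
lemma czyLoop_char (s : List Char) : ∀ (fuel i j : Nat), s.length - i ≤ fuel →
    i ≤ s.length → j ≤ s.length →
    czyLoop s ((s.length : Int) - 1) (i : Int) (j : Int) =
      if s.drop i < s.drop j then "TAK" else "NIE" := by
  intro fuel
  induction fuel with
  | zero =>
    intro i j hf hi hj
    have hie : i = s.length := by omega
    rw [czyLoop]
    have h1 : ¬ ((i : Int) ≤ (s.length : Int) - 1 ∧ (j : Int) ≤ (s.length : Int) - 1) := by omega
    rw [if_neg h1]
    subst hie
    simp only [List.drop_length]
    by_cases hjl : j < s.length
    · rw [if_pos (by omega : (j:Int) ≤ (s.length : Int) - 1)]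
      rw [if_pos]
      cases hd : s.drop j with
      | nil => exfalso; rw [List.drop_eq_nil_iff] at hd; omega
      | cons a l => exact List.nil_lt_cons a l
    · have hje : j = s.length := by omega
      subst hje
      rw [if_neg (by omega : ¬ ((s.length:Int) ≤ (s.length : Int) - 1))]
      simp only [List.drop_length]
      rw [if_neg (List.not_lt_nil _)]
  | succ m ih =>
    intro i j hf hi hj
    rw [czyLoop]
    by_cases h1 : ((i : Int) ≤ (s.length : Int) - 1 ∧ (j : Int) ≤ (s.length : Int) - 1)
    · have hil : i < s.length := by omega
      have hjl : j < s.length := by omega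
      rw [if_pos h1]
      have gi : PySem.List.pyGetD s (i : Int) ' ' = s[i] := by
        rw [PySem.List.pyGetD_natCast]; simp [List.getD_eq_getElem?_getD, hil]
      have gj : PySem.List.pyGetD s (j : Int) ' ' = s[j] := by
        rw [PySem.List.pyGetD_natCast]; simp [List.getD_eq_getElem?_getD, hjl]
      rw [gi, gj]
      have di : s.drop i = s[i] :: s.drop (i+1) := by
        rw [List.drop_eq_getElem_cons hil]
      have dj : s.drop j = s[j] :: s.drop (j+1) := by
        rw [List.drop_eq_getElem_cons hjl]
      by_cases he : s[i] = s[j]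
      · rw [if_pos he]
        have ci : ((i:Int)+1) = ((i+1 : Nat) : Int) := by push_cast; ring
        have cj : ((j:Int)+1) = ((j+1 : Nat) : Int) := by push_cast; ring
        rw [ci, cj, ih (i+1) (j+1) (by omega) (by omega) (by omega), di, dj]
        by_cases hlt : s.drop (i+1) < s.drop (j+1)
        · rw [if_pos hlt, if_pos (List.cons_lt_cons_iff.mpr (Or.inr ⟨he, hlt⟩))]
        · rw [if_neg hlt, if_neg]
          intro h
          rcases List.cons_lt_cons_iff.mp h with h | ⟨-, h⟩
          · exact absurd he (ne_of_lt h)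
          · exact hlt h
      · rw [if_neg he, di, dj]
        by_cases hlt : s[i] < s[j]
        · rw [if_pos hlt, if_pos (List.cons_lt_cons_iff.mpr (Or.inl hlt))]
        · rw [if_neg hlt, if_neg]
          intro h
          rcases List.cons_lt_cons_iff.mp h with h | ⟨h, -⟩
          · exact hlt h
          · exact he h
    · -- loop exit, i = s.length (since fuel not exhausted... no: h1 false means i=len or j=len)
      rw [if_neg h1]
      by_cases hjl : j < s.length
      · have hie : i = s.length := by omega
        subst hie
        rw [if_pos (by omega : (j:Int) ≤ (s.length : Int) - 1)]
        simp only [List.drop_length]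
        rw [if_pos]
        cases hd : s.drop j with
        | nil => exfalso; rw [List.drop_eq_nil_iff] at hd; omega
        | cons a l => exact List.nil_lt_cons a l
      · have hje : j = s.length := by omega
        subst hje
        rw [if_neg (by omega : ¬ ((s.length:Int) ≤ (s.length : Int) - 1))]
        simp only [List.drop_length]
        rw [if_neg (List.not_lt_nil _)]

lemma czy_tak_iff (s : String) (i j : Nat) (hi : i ≤ s.toList.length) (hj : j ≤ s.toList.length) :
    czy_mniejszy (PySem.Str.len s) s ((i : Int) + 1) ((j : Int) + 1) =
      if s.toList.drop i < s.toList.drop j then "TAK" else "NIE" := by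
  unfold czy_mniejszy
  rw [PySem.Str.len_eq]
  have e1 : ((i : Int) + 1 - 1) = (i : Int) := by ring
  have e2 : ((j : Int) + 1 - 1) = (j : Int) := by ring
  rw [e1, e2]
  exact czyLoop_char s.toList s.toList.length i j (by omega) hi hj

lemma foldl_add_one {β : Type} (l : List β) : ∀ (n : Nat),
    l.foldl (fun acc _ => acc + 1) n = n + l.length := by
  induction l with
  | nil => intro n; simp
  | cons x t ih => intro n; simp [List.foldl, ih]; omega

-- licznik = 0 iff no j in the range witnesses "NIE"
lemma licznik_zero_iff (slowo : String) (len : Int) (lista : List Int) (i : Int) :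
    (lista.foldl
      (fun acc j => if i ≠ j ∧ czy_mniejszy len slowo i j = "NIE" then acc + 1 else acc) 0 = 0)
      ↔ ∀ j ∈ lista, i ≠ j → czy_mniejszy len slowo i j ≠ "NIE" := by
  rw [PySem.List.foldl_ite_eq_foldl_filter (fun j => i ≠ j ∧ czy_mniejszy len slowo i j = "NIE")
    (fun acc _ => acc + 1) lista 0]
  rw [foldl_add_one]
  simp only [Nat.zero_add]
  rw [List.length_eq_zero_iff, List.filter_eq_nil_iff]
  constructor
  · intro h j hj hne hc
    have := h j hj
    simp only [decide_eq_true_eq, not_and] at this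
    exact this hne hc
  · intro h j hj
    simp only [decide_eq_true_eq, not_and]
    exact h j hj

-- the outer loop returns the suffix of the unique index whose counter is 0
lemma aLoop_eq (slowo : String) (len : Int) (lista : List Int) (i0 : Int)
    (huniq : ∀ i ∈ lista, (∀ j ∈ lista, i ≠ j → czy_mniejszy len slowo i j ≠ "NIE") → i = i0)
    (hgood : ∀ j ∈ lista, i0 ≠ j → czy_mniejszy len slowo i0 j ≠ "NIE") :
    ∀ rest : List Int, i0 ∈ rest → (∀ i ∈ rest, i ∈ lista) →
      aLoop slowo len lista rest = PySem.Str.slice slowo (some (i0 - 1)) none := by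
  intro rest
  induction rest with
  | nil => intro h; exact absurd h (List.not_mem_nil)
  | cons i t ih =>
    intro hmem hsub
    rw [aLoop]
    by_cases hz : lista.foldl
        (fun acc j => if i ≠ j ∧ czy_mniejszy len slowo i j = "NIE" then acc + 1 else acc) 0 = 0
    · rw [if_pos hz]
      have hgoodi := (licznik_zero_iff slowo len lista i).mp hz
      have : i = i0 := huniq i (hsub i List.mem_cons_self) hgoodi
      rw [this]
    · rw [if_neg hz]
      have hne : i0 ≠ i := by
        intro he
        exact hz ((licznik_zero_iff slowo len lista i).mpr (he ▸ hgood))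
      have : i0 ∈ t := by
        rcases List.mem_cons.mp hmem with h | h
        · exact absurd h hne
        · exact h
      exact ih this (fun x hx => hsub x (List.mem_cons_of_mem _ hx))

-- slowo[k:] for distinct k < len(slowo) are distinct strings (their lengths differ)
lemma suffix_ne (s : String) (k j : Nat) (hk : k < s.toList.length) (hj : j < s.toList.length)
    (hne : k ≠ j) :
    PySem.Str.slice s (some (k : Int)) none ≠ PySem.Str.slice s (some (j : Int)) none := by
  intro h
  have := congrArg (fun t => t.toList.length) h
  simp only [slice_toList, List.length_drop] at this
  omega

lemma suffix_mem_map (s : String) (j : Nat) (hj : j < s.toList.length) :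
    PySem.Str.slice s (some (j : Int)) none ∈
      (PySem.List.pyRange 0 (PySem.Str.len s) 1).map
        (fun i => PySem.Str.slice s (some i) none) := by
  exact List.mem_map.mpr ⟨(j : Int), by
    rw [PySem.Str.len_eq, PySem.List.mem_pyRange_one]; omega, rfl⟩

theorem najmnniejszy_sufiks_spec : Claim_equal_najmnniejszy_sufiks := by
  intro slowo _hdom hpre
  unfold Spec_najmnniejszy_sufiks
  have hne : slowo.toList ≠ [] := by
    intro h
    apply hpre
    have := congrArg String.ofList h
    rw [String.ofList_toList] at this
    simpa using this
  set n := slowo.toList.length with hn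
  have hnpos : 0 < n := List.length_pos_iff.mpr hne
  set L := (PySem.List.pyRange 0 (PySem.Str.len slowo) 1).map
      (fun i => PySem.Str.slice slowo (some i) none) with hL
  have hLne : L ≠ [] := by
    intro h
    have := suffix_mem_map slowo 0 hnpos
    rw [← hL, h] at this
    exact List.not_mem_nil this
  obtain ⟨m, hm⟩ : ∃ m, PySem.List.min? L (fun x => x) = some m := by
    cases h : PySem.List.min? L (fun x => x) with
    | none => exact absurd ((PySem.List.min?_eq_none_iff L _).mp h) hLne
    | some m => exact ⟨m, rfl⟩
  have hmmem := PySem.List.min?_mem hm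
  have hmin : ∀ y ∈ L, m ≤ y := PySem.List.min?_isMin hm
  obtain ⟨ki, hki, hkm⟩ := List.mem_map.mp hmmem
  rw [PySem.Str.len_eq, PySem.List.mem_pyRange_one] at hki
  obtain ⟨hki0, hkin⟩ := hki
  set k : Nat := ki.toNat with hkdef
  have hkcast : (k : Int) = ki := Int.toNat_of_nonneg hki0
  have hkn : k < n := by omega
  have hmk : m = PySem.Str.slice slowo (some (k : Int)) none := by
    rw [hkcast, hkm]
  -- drop k is strictly below every other suffix
  have hstrict : ∀ j : Nat, j < n → j ≠ k →
      slowo.toList.drop k < slowo.toList.drop j := by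
    intro j hj hjk
    have hle : m ≤ PySem.Str.slice slowo (some (j : Int)) none :=
      hmin _ (suffix_mem_map slowo j hj)
    have hne' : m ≠ PySem.Str.slice slowo (some (j : Int)) none := by
      rw [hmk]
      exact suffix_ne slowo k j hkn hj (fun h => hjk h.symm)
    have hlt := lt_of_le_of_ne hle hne'
    rw [hmk, String.lt_iff_toList_lt, slice_toList, slice_toList] at hlt
    exact hlt
  -- A's loop returns slowo[k:]
  have hA : najmnniejszy_sufiks slowo = PySem.Str.slice slowo (some ((k : Int) + 1 - 1)) none := by
    show aLoop slowo (PySem.Str.len slowo) (PySem.List.pyRange 1 (PySem.Str.len slowo + 1) 1)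
        (PySem.List.pyRange 1 (PySem.Str.len slowo + 1) 1) = _
    apply aLoop_eq slowo (PySem.Str.len slowo) _ ((k : Int) + 1)
    · -- uniqueness: any good index equals k+1
      intro i hi hgood
      rw [PySem.Str.len_eq, PySem.List.mem_pyRange_one] at hi
      by_contra hik
      set i' : Nat := (i - 1).toNat with hi'def
      have hicast : i = (i' : Int) + 1 := by omega
      have hi'n : i' < n := by omega
      have hi'k : i' ≠ k := by omega
      have hj : ((k : Int) + 1) ∈ PySem.List.pyRange 1 (PySem.Str.len slowo + 1) 1 := by
        rw [PySem.Str.len_eq, PySem.List.mem_pyRange_one]; omega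
      have := hgood _ hj (by omega)
      rw [hicast, czy_tak_iff slowo i' k (by omega) (by omega)] at this
      have hlt : slowo.toList.drop i' < slowo.toList.drop k := by
        by_contra hno
        rw [if_neg hno] at this
        exact this rfl
      -- contradicts minimality of m
      have hle : m ≤ PySem.Str.slice slowo (some ((i' : Int))) none :=
        hmin _ (suffix_mem_map slowo i' hi'n)
      have : PySem.Str.slice slowo (some ((i' : Int))) none < m := by
        rw [hmk, String.lt_iff_toList_lt, slice_toList, slice_toList]
        exact hlt
      exact absurd hle (not_le_of_gt this)
    · -- k+1 is good
      intro j hj hkj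
      rw [PySem.Str.len_eq, PySem.List.mem_pyRange_one] at hj
      set j' : Nat := (j - 1).toNat with hj'def
      have hjcast : j = (j' : Int) + 1 := by omega
      have hj'n : j' < n := by omega
      have hj'k : j' ≠ k := by omega
      rw [hjcast, czy_tak_iff slowo k j' (by omega) (by omega)]
      rw [if_pos (hstrict j' hj'n hj'k)]
      simp
    · rw [PySem.Str.len_eq, PySem.List.mem_pyRange_one]; omega
    · exact fun x hx => hx
  rw [hA]
  show _ = (PySem.List.min? L (fun x => x)).getD ""
  rw [hm]
  have : ((k : Int) + 1 - 1) = (k : Int) := by ring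
  rw [this, ← hmk]
  rfl
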